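-- pv_equiv track=rewrite | github.com/wandrewjam/advent-of-code | 2020/problem10.py | count_sub_arrangements
-- ===== SOURCE A (Python) =====
-- def count_sub_arrangements(sublist: list) -> int:
--     """Count all possible arrangements of a given sublist
--
--     :param sublist: Sublist of possible adapters
--     :return: Count of all valid arrangements of sublists
--     """
--     candidate_count = 2 ** (len(sublist) - 2)
--     if candidate_count == 1:
--         return 1
--     else:
--         valid_count = 0
--         for i in range(candidate_count):
--             bin_i = format(i, 'b')
--             bin_i = '0' * (len(sublist) - len(bin_i) - 2) + bin_i
--             bin_i = '1' + bin_i + '1'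
--             candidate = [sublist[j] for j in range(len(sublist))
--                          if bin_i[j] == '1']
--             diffs = [candidate[i+1] - candidate[i]
--                      for i in range(len(candidate) - 1)]
--             valid_count += (max(diffs) <= 3)
--
--         return valid_count
-- ===== SOURCE B (Python) =====
-- def count_sub_arrangements(sublist: list) -> int:
--     """Count valid arrangements (first and last adapter kept, consecutive
--     gaps at most 3) by dynamic programming from the right instead of
--     enumerating all 2**(n-2) bitmask candidates.
--
--     acc holds, for each suffix position, the pair (adapter value, number of
--     valid chains from that adapter through the remaining adapters to the last
--     one)."""
--     acc = []
--     for v in reversed(sublist):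
--         if not acc:
--             c = 1  # the last adapter: the chain ends here
--         else:
--             c = sum(w for (u, w) in acc if u - v <= 3)
--         acc = [(v, c)] + acc
--     return acc[0][1]
-- ===== Notes on version B (the rewrite author's own statement) =====
-- stated objective: faster
-- what changed: Replaced the brute-force enumeration of all 2**(n-2) bitmask candidates (building and checking each candidate list) by a right-to-left dynamic program that stores, for every adapter, the number of valid chains from it to the last adapter.
-- intended difference: On two-element lists whose gap exceeds 3 (e.g. [0, 10]) A returns 1 because its 2**(n-2)==1 shortcut skips the gap check, while B returns 0; the only arrangement violates the gap-at-most-3 rule, so 0 is the intended count. — e.g. on count_sub_arrangements([0, 10]): A returns 1, B returns 0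
import Mathlib
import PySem

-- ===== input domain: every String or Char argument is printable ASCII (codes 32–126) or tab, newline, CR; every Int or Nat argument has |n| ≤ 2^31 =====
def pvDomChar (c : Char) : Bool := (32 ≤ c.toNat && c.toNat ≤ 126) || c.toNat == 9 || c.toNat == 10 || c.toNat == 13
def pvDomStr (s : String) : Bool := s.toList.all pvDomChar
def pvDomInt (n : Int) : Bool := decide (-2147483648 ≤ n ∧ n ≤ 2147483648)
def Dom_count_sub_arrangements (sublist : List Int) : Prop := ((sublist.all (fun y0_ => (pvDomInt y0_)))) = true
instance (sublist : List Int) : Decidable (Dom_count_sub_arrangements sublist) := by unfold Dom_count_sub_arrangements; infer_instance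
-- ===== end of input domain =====

-- B replaces A's enumeration of all 2**(n-2) bitmask candidates by a right-to-left dynamic
-- program over the adapters (objective: faster, asymptotic).

-- ===== PORT A =====

-- helper for format(i, 'b'): binary digits (MSB first) of a positive number, [] for 0
def pvGoB (n : Nat) : List Char :=
  if _h : n = 0 then []
  else pvGoB (n / 2) ++ [if n % 2 = 1 then '1' else '0']
decreasing_by exact Nat.div_lt_self (Nat.pos_of_ne_zero _h) one_lt_two

-- format(i, 'b') for i ≥ 0 (the only use in A: i runs over range(candidate_count))
def pvFmtB (n : Nat) : List Char := if n = 0 then ['0'] else pvGoB n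

-- the body of A's for-loop (one candidate bitmask i), exactly as in the Python
def pvBodyA (sublist : List Int) (valid_count : Int) (i : Int) : Int :=
  let bin_i : List Char := pvFmtB i.toNat                                  -- format(i, 'b'), i ≥ 0
  let bin_i : List Char := List.replicate (sublist.length - bin_i.length - 2) '0' ++ bin_i
  let bin_i : List Char := '1' :: bin_i ++ ['1']
  let candidate : List Int :=
    ((PySem.List.pyRange 0 (sublist.length : Int) 1).filter
        (fun j => (PySem.List.pyGet? bin_i j).getD ' ' = '1')).map
      (fun j => (PySem.List.pyGet? sublist j).getD 0)                      -- j always in range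
  let diffs : List Int :=
    (PySem.List.pyRange 0 ((candidate.length : Int) - 1) 1).map
      (fun k => (PySem.List.pyGet? candidate (k + 1)).getD 0 -
                (PySem.List.pyGet? candidate k).getD 0)                    -- k, k+1 always in range
  valid_count +
    (match PySem.List.max? diffs (fun d => d) with                         -- max(diffs); diffs ≠ [] here
     | some m => if m ≤ 3 then 1 else 0
     | none => 0)

def count_sub_arrangements (sublist : List Int) : Int :=
  -- candidate_count = 2 ** (len(sublist) - 2): exact for len(sublist) ≥ 2 (Pre_);
  -- for shorter lists Python makes a float here and raises TypeError at range()
  let candidate_count : Int := 2 ^ (((sublist.length : Int) - 2).toNat)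
  if candidate_count = 1 then 1
  else
    (PySem.List.pyRange 0 candidate_count 1).foldl (pvBodyA sublist) 0

-- ===== PORT B =====

def count_sub_arrangements_alt (sublist : List Int) : Int :=
  let acc : List (Int × Int) :=
    sublist.reverse.foldl (fun acc v =>
      let c : Int :=
        if acc = [] then 1
        else ((acc.filter (fun p => p.1 - v ≤ 3)).map (fun p => p.2)).sum
      (v, c) :: acc) []
  ((PySem.List.pyGet? acc 0).getD (0, 0)).2   -- acc[0][1]; acc = [] only for sublist = [], outside Pre_

-- ===== PRECONDITION & SPEC =====

-- A raises TypeError for lists of length < 2 (2 ** negative is a float); nothing else is excluded.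
def Pre_count_sub_arrangements (sublist : List Int) : Prop := 2 ≤ sublist.length
instance (sublist : List Int) : Decidable (Pre_count_sub_arrangements sublist) := by
  unfold Pre_count_sub_arrangements; infer_instance

def pvWitness_count_sub_arrangements : List Int := [1, 2, 3]

-- On two-element lists whose gap exceeds 3, A returns 1 (its 2**(n-2)==1 shortcut skips the gap
-- check) while B returns 0; the only arrangement violates the gap-at-most-3 rule, so 0 is intended.
def D_count_sub_arrangements (sublist : List Int) : Prop :=
  sublist.length = 2 ∧ 3 < sublist.getD 1 0 - sublist.getD 0 0
instance (sublist : List Int) : Decidable (D_count_sub_arrangements sublist) := by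
  unfold D_count_sub_arrangements; infer_instance

def Spec_count_sub_arrangements (sublist : List Int) (out : Int) : Prop :=
  ¬ D_count_sub_arrangements sublist → out = count_sub_arrangements_alt sublist
instance (sublist : List Int) (out : Int) : Decidable (Spec_count_sub_arrangements sublist out) := by
  unfold Spec_count_sub_arrangements; infer_instance

def pvDiffWitness_count_sub_arrangements : List Int := [0, 10]
def pvDiffWitnessOut_count_sub_arrangements : Int × Int := (1, 0)

-- ===== CLAIM (what is proved, stated in full; the proofs are below) =====

def Claim_unchanged_count_sub_arrangements : Prop :=
  ∀ (sublist : List Int), Dom_count_sub_arrangements sublist →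
    Pre_count_sub_arrangements sublist →
    Spec_count_sub_arrangements sublist (count_sub_arrangements sublist)

def Claim_changed_count_sub_arrangements : Prop :=
  Dom_count_sub_arrangements (pvDiffWitness_count_sub_arrangements) ∧
  Pre_count_sub_arrangements (pvDiffWitness_count_sub_arrangements) ∧
  D_count_sub_arrangements (pvDiffWitness_count_sub_arrangements) ∧
  count_sub_arrangements (pvDiffWitness_count_sub_arrangements) = pvDiffWitnessOut_count_sub_arrangements.1 ∧
  count_sub_arrangements_alt (pvDiffWitness_count_sub_arrangements) = pvDiffWitnessOut_count_sub_arrangements.2 ∧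
  pvDiffWitnessOut_count_sub_arrangements.1 ≠ pvDiffWitnessOut_count_sub_arrangements.2

def Claim_exact_count_sub_arrangements : Prop :=
  ∀ (sublist : List Int), Dom_count_sub_arrangements sublist →
    Pre_count_sub_arrangements sublist →
    D_count_sub_arrangements sublist →
    count_sub_arrangements sublist ≠ count_sub_arrangements_alt sublist

-- ===== LEMMAS AND PROOFS =====

-- number of valid chains through ys that start from value `prev`, must contain the last
-- element of ys, and never jump by more than 3
def cnt (prev : Int) : List Int → Int
  | [] => 0
  | y :: ys => (if y - prev ≤ 3 then (if ys.isEmpty then 1 else cnt y ys) else 0) + cnt prev ys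

-- the accumulator B builds for a suffix
def gacc : List Int → List (Int × Int)
  | [] => []
  | v :: ys =>
    (v, if gacc ys = [] then 1
        else (((gacc ys).filter (fun p => p.1 - v ≤ 3)).map (fun p => p.2)).sum) :: gacc ys

theorem gacc_eq_nil_iff (ys : List Int) : gacc ys = [] ↔ ys = [] := by
  cases ys <;> simp [gacc]

theorem foldB (ys : List Int) :
    ys.reverse.foldl (fun acc v =>
      ((v, if acc = [] then (1 : Int)
           else ((acc.filter (fun p => p.1 - v ≤ 3)).map (fun p => p.2)).sum) :: acc)) [] = gacc ys := by
  rw [List.foldl_reverse]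
  induction ys with
  | nil => rfl
  | cons v ys ih => simp only [List.foldr_cons]; rw [ih]; rfl

theorem sumsel (ys : List Int) (v : Int) (h : ys ≠ []) :
    (((gacc ys).filter (fun p => p.1 - v ≤ 3)).map (fun p => p.2)).sum = cnt v ys := by
  induction ys generalizing v with
  | nil => exact absurd rfl h
  | cons y ys ih =>
    cases ys with
    | nil =>
      have hG : gacc [y] = [(y, 1)] := rfl
      rw [hG]
      by_cases hy : y - v ≤ 3 <;>
        simp [cnt, hy, show (y ≤ 3 + v) ↔ (y - v ≤ 3) from by omega]
    | cons z zs =>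
      have hne : (z :: zs) ≠ ([] : List Int) := by simp
      have hg : gacc (z :: zs) ≠ [] := by simp [gacc_eq_nil_iff]
      have hG : gacc (y :: z :: zs) =
          (y, if gacc (z :: zs) = [] then 1
              else (((gacc (z :: zs)).filter (fun p => p.1 - y ≤ 3)).map (fun p => p.2)).sum) ::
            gacc (z :: zs) := rfl
      rw [hG, if_neg hg, List.filter_cons]
      by_cases hy : y - v ≤ 3
      · rw [if_pos (by simpa using hy)]
        simp only [List.map_cons, List.sum_cons]
        rw [ih y hne, ih v hne]
        simp [cnt, hy]
      · rw [if_neg (by simpa using hy)]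
        rw [ih v hne]
        simp [cnt, hy]

theorem altB (x : Int) (ys : List Int) (h : ys ≠ []) :
    count_sub_arrangements_alt (x :: ys) = cnt x ys := by
  have hg : gacc ys ≠ [] := by simp [gacc_eq_nil_iff, h]
  unfold count_sub_arrangements_alt
  simp only []
  rw [foldB (x :: ys)]
  have hG : gacc (x :: ys) =
      (x, if gacc ys = [] then 1
          else (((gacc ys).filter (fun p => p.1 - x ≤ 3)).map (fun p => p.2)).sum) :: gacc ys := rfl
  rw [hG, if_neg hg, sumsel ys x h]
  simp [pysem]

-- ===== A-side proof machinery =====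

-- fixed-width (m bits, MSB first) binary representation as characters
def bitsM : Nat → Nat → List Char
  | 0, _ => []
  | m + 1, i => (if 2 ^ m ≤ i then '1' else '0') :: bitsM m (i % 2 ^ m)

-- all bitstrings of length m, in the order the counter 0 .. 2^m - 1 produces them
def allMasks : Nat → List (List Char)
  | 0 => [[]]
  | m + 1 => (allMasks m).map (fun l => '0' :: l) ++ (allMasks m).map (fun l => '1' :: l)

-- the elements of xs at positions whose mask character is '1'
def selectCh : List Int → List Char → List Int
  | x :: xs, c :: cs => if c = '1' then x :: selectCh xs cs else selectCh xs cs
  | _, _ => []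

-- consecutive differences
def diffsOf : List Int → List Int
  | x :: y :: r => (y - x) :: diffsOf (y :: r)
  | _ => []

-- 1 if every consecutive difference is ≤ 3, else 0
def indC (c : List Int) : Int := if (diffsOf c).all (fun d => d ≤ 3) then 1 else 0

theorem bitsM_length (m i : Nat) : (bitsM m i).length = m := by
  induction m generalizing i with
  | zero => rfl
  | succ m ih => simp [bitsM, ih]

theorem bitsM_zero (m : Nat) : bitsM m 0 = List.replicate m '0' := by
  induction m with
  | zero => rfl
  | succ m ih =>
    show (if 2 ^ m ≤ 0 then '1' else '0') :: bitsM m (0 % 2 ^ m) = _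
    rw [if_neg (by have := Nat.pow_pos (show 0 < 2 by norm_num) (n := m); omega),
        Nat.zero_mod, ih, List.replicate_succ]

theorem bitsM_lsb (m : Nat) : ∀ i, i < 2 ^ (m + 1) →
    bitsM (m + 1) i = bitsM m (i / 2) ++ [if i % 2 = 1 then '1' else '0'] := by
  induction m with
  | zero => intro i hi; interval_cases i <;> rfl
  | succ m ih =>
    intro i hi
    have h2 : (2:Nat) ^ (m + 2) = 2 * 2 ^ (m + 1) := by ring
    have hmod : i % 2 ^ (m + 1) % 2 = i % 2 := by
      exact Nat.mod_mod_of_dvd i (dvd_pow_self 2 (Nat.succ_ne_zero m))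
    have hdiv : i % 2 ^ (m + 1) / 2 = i / 2 % 2 ^ m := by
      have : i % (2 * 2 ^ m) / 2 = i / 2 % 2 ^ m := Nat.mod_mul_right_div_self i 2 (2 ^ m)
      simpa [pow_succ'] using this
    have hcond : (2 ^ (m + 1) ≤ i) ↔ (2 ^ m ≤ i / 2) := by
      rw [Nat.le_div_iff_mul_le (by norm_num)]
      have hp : (2:Nat) ^ (m + 1) = 2 ^ m * 2 := by ring
      omega
    have hrec : bitsM (m + 1) (i % 2 ^ (m + 1)) =
        bitsM m (i % 2 ^ (m + 1) / 2) ++ [if i % 2 ^ (m + 1) % 2 = 1 then '1' else '0'] :=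
      ih _ (Nat.mod_lt _ (by positivity))
    calc bitsM (m + 2) i
        = (if 2 ^ (m + 1) ≤ i then '1' else '0') :: bitsM (m + 1) (i % 2 ^ (m + 1)) := rfl
      _ = (if 2 ^ m ≤ i / 2 then '1' else '0') ::
            (bitsM m (i / 2 % 2 ^ m) ++ [if i % 2 = 1 then '1' else '0']) := by
            rw [hrec, hmod, hdiv, if_congr hcond rfl rfl]
      _ = bitsM (m + 1) (i / 2) ++ [if i % 2 = 1 then '1' else '0'] := rfl

theorem goB_pow_add (m : Nat) : ∀ i, i < 2 ^ m → pvGoB (2 ^ m + i) = '1' :: bitsM m i := by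
  induction m with
  | zero =>
    intro i hi
    have h0 : i = 0 := by omega
    subst h0
    show pvGoB 1 = '1' :: bitsM 0 0
    rw [pvGoB, dif_neg one_ne_zero]
    norm_num
    rw [pvGoB]
    simp [bitsM]
  | succ m ih =>
    intro i hi
    have h2 : (2:Nat) ^ (m + 1) = 2 * 2 ^ m := by ring
    have hdiv : (2 ^ (m + 1) + i) / 2 = 2 ^ m + i / 2 := by omega
    have hmod : (2 ^ (m + 1) + i) % 2 = i % 2 := by omega
    have hne : ¬(2 ^ (m + 1) + i = 0) := by positivity
    rw [pvGoB, dif_neg hne, hdiv, hmod, ih (i / 2) (by omega),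
        bitsM_lsb m i hi]
    rfl

theorem goB_len_le (m : Nat) : ∀ i, i < 2 ^ m → (pvGoB i).length ≤ m := by
  induction m with
  | zero =>
    intro i hi
    have h0 : i = 0 := by omega
    subst h0
    rw [pvGoB]
    simp
  | succ m ih =>
    intro i hi
    by_cases h0 : i = 0
    · subst h0
      rw [pvGoB]
      simp
    · rw [pvGoB, dif_neg h0]
      have h2 : (2:Nat) ^ (m + 1) = 2 * 2 ^ m := by ring
      have hlen := ih (i / 2) (by omega)
      simp only [List.length_append, List.length_cons, List.length_nil]
      omega

theorem fmt_pad (m : Nat) : ∀ i, 1 ≤ m → i < 2 ^ m →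
    List.replicate (m - (pvFmtB i).length) '0' ++ pvFmtB i = bitsM m i := by
  induction m with
  | zero => intro i hm; omega
  | succ m ih =>
    intro i _ hi
    by_cases h0 : i = 0
    · subst h0
      have : pvFmtB 0 = ['0'] := rfl
      rw [this, bitsM_zero]
      simp only [List.length_cons, List.length_nil]
      rw [show m + 1 - (0 + 1) = m from by omega, ← List.replicate_succ']
    · have hfmt : pvFmtB i = pvGoB i := by simp [pvFmtB, h0]
      by_cases hbig : 2 ^ m ≤ i
      · have hr : i = 2 ^ m + (i - 2 ^ m) := by omega
        have hlt : i - 2 ^ m < 2 ^ m := by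
          have h2 : (2:Nat) ^ (m + 1) = 2 * 2 ^ m := by ring
          omega
        have hgo : pvGoB i = '1' :: bitsM m (i - 2 ^ m) := by
          conv_lhs => rw [hr]
          exact goB_pow_add m _ hlt
        have hmod : i % 2 ^ m = i - 2 ^ m := by
          conv_lhs => rw [hr]
          rw [Nat.add_mod_left, Nat.mod_eq_of_lt hlt]
        have hlen : (pvFmtB i).length = m + 1 := by
          rw [hfmt, hgo]; simp [bitsM_length]
        rw [hlen, hfmt, hgo, Nat.sub_self, List.replicate_zero, List.nil_append]
        show _ = (if 2 ^ m ≤ i then '1' else '0') :: bitsM m (i % 2 ^ m)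
        rw [if_pos hbig, hmod]
      · have hm1 : 1 ≤ m := by
          by_contra hc
          have : m = 0 := by omega
          subst this
          simp at hbig
          omega
        have hlt : i < 2 ^ m := by omega
        have hmod : i % 2 ^ m = i := Nat.mod_eq_of_lt hlt
        have hlen : (pvFmtB i).length ≤ m := by rw [hfmt]; exact goB_len_le m i hlt
        have hstep : m + 1 - (pvFmtB i).length = (m - (pvFmtB i).length) + 1 := by omega
        rw [hstep, List.replicate_succ, List.cons_append, ih i hm1 hlt]
        show _ = (if 2 ^ m ≤ i then '1' else '0') :: bitsM m (i % 2 ^ m)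
        rw [if_neg hbig, hmod]

theorem sum_bits_eq (m : Nat) : ∀ (F : List Char → Int),
    ((List.range (2 ^ m)).map (fun i => F (bitsM m i))).sum = ((allMasks m).map F).sum := by
  induction m with
  | zero => intro F; rfl
  | succ m ih =>
    intro F
    have h2 : (2:Nat) ^ (m + 1) = 2 ^ m + 2 ^ m := by ring
    rw [h2, List.range_add, List.map_append, List.sum_append, List.map_map]
    have e1 : (List.range (2 ^ m)).map (fun i => F (bitsM (m + 1) i)) =
        (List.range (2 ^ m)).map (fun i => F ('0' :: bitsM m i)) := by
      apply List.map_congr_left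
      intro i hi
      have hi' : i < 2 ^ m := List.mem_range.mp hi
      have : bitsM (m + 1) i = '0' :: bitsM m i := by
        show (if 2 ^ m ≤ i then '1' else '0') :: bitsM m (i % 2 ^ m) = _
        rw [if_neg (by omega), Nat.mod_eq_of_lt hi']
      rw [this]
    have e2 : (List.range (2 ^ m)).map ((fun i => F (bitsM (m + 1) i)) ∘ fun x => 2 ^ m + x) =
        (List.range (2 ^ m)).map (fun i => F ('1' :: bitsM m i)) := by
      apply List.map_congr_left
      intro i hi
      have hi' : i < 2 ^ m := List.mem_range.mp hi
      have : bitsM (m + 1) (2 ^ m + i) = '1' :: bitsM m i := by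
        show (if 2 ^ m ≤ 2 ^ m + i then '1' else '0') :: bitsM m ((2 ^ m + i) % 2 ^ m) = _
        rw [if_pos (by omega), Nat.add_mod_left, Nat.mod_eq_of_lt hi']
      simp only [Function.comp_apply, this]
    rw [e1, e2, ih (fun l => F ('0' :: l)), ih (fun l => F ('1' :: l))]
    simp [allMasks, List.map_map, Function.comp_def]

theorem sel_eq_nat (xs : List Int) : ∀ (cs : List Char), cs.length = xs.length →
    ((List.range xs.length).filter (fun k => (cs[k]?.getD ' ') = '1')).map
      (fun k => xs[k]?.getD 0) = selectCh xs cs := by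
  induction xs with
  | nil => intro cs h; simp [selectCh]
  | cons x xs ih =>
    intro cs h
    cases cs with
    | nil => simp at h
    | cons c cs =>
      simp only [List.length_cons] at h ⊢
      rw [List.range_succ_eq_map, List.filter_cons]
      have hcomp : ((List.range xs.length).filter
            ((fun k => decide ((c :: cs)[k]?.getD ' ' = '1')) ∘ Nat.succ)).map
            ((fun k => (x :: xs)[k]?.getD 0) ∘ Nat.succ) = selectCh xs cs := by
        rw [← ih cs (by omega)]
        rfl
      by_cases hc : c = '1'
      · rw [if_pos (by simp [hc]), List.map_cons, List.filter_map, List.map_map, hcomp]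
        simp [selectCh, hc]
      · rw [if_neg (by simp [hc]), List.filter_map, List.map_map, hcomp]
        simp [selectCh, hc]

theorem selectCh_append (xs : List Int) : ∀ (cs : List Char) (x : Int), cs.length = xs.length →
    selectCh (xs ++ [x]) (cs ++ ['1']) = selectCh xs cs ++ [x] := by
  induction xs with
  | nil => intro cs x h; cases cs with | nil => rfl | cons _ _ => simp at h
  | cons y xs ih =>
    intro cs x h
    cases cs with
    | nil => simp at h
    | cons c cs =>
      simp only [List.length_cons] at h
      simp only [List.cons_append, selectCh]
      by_cases hc : c = '1' <;> simp [hc, ih cs x (by omega)]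

theorem diffs_eq_nat (c : List Int) :
    ((List.range (c.length - 1)).map
      (fun k => (getElem? c (k + 1)).getD 0 - (getElem? c k).getD 0)) = diffsOf c := by
  induction c with
  | nil => rfl
  | cons x t ih =>
    cases t with
    | nil => rfl
    | cons y r =>
      show ((List.range (r.length + 1)).map
        (fun k => (getElem? (x :: y :: r) (k + 1)).getD 0 - (getElem? (x :: y :: r) k).getD 0)) = _
      rw [List.range_succ_eq_map, List.map_cons, List.map_map]
      have hsh : (List.range r.length).map
            ((fun k => (getElem? (x :: y :: r) (k + 1)).getD 0 - (getElem? (x :: y :: r) k).getD 0)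
              ∘ Nat.succ) =
          (List.range r.length).map
            (fun k => (getElem? (y :: r) (k + 1)).getD 0 - (getElem? (y :: r) k).getD 0) := rfl
      rw [hsh]
      have ih' : (List.range ((y :: r).length - 1)).map
          (fun k => (getElem? (y :: r) (k + 1)).getD 0 - (getElem? (y :: r) k).getD 0) =
          diffsOf (y :: r) := ih
      simp only [List.length_cons, Nat.add_sub_cancel] at ih'
      rw [ih']
      rfl

theorem max_ind (ds : List Int) (hne : ds ≠ []) :
    (match PySem.List.max? ds (fun d => d) with
     | some m => if m ≤ 3 then (1 : Int) else 0
     | none => 0) = if ds.all (fun d => decide (d ≤ 3)) then 1 else 0 := by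
  cases h : PySem.List.max? ds (fun d => d) with
  | none => exact absurd ((PySem.List.max?_eq_none_iff ds _).mp h) hne
  | some m =>
    have hmem := PySem.List.max?_mem h
    have hmax := PySem.List.max?_isMax h
    simp only []
    by_cases hm : m ≤ 3
    · rw [if_pos hm, if_pos]
      simp only [List.all_eq_true, decide_eq_true_eq]
      intro d hd; exact le_trans (hmax d hd) hm
    · rw [if_neg hm, if_neg]
      simp only [List.all_eq_true, decide_eq_true_eq, not_forall]
      exact ⟨m, hmem, hm⟩

theorem diffsOf_ne (x l : Int) (zs : List Int) : diffsOf (x :: zs ++ [l]) ≠ [] := by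
  cases zs <;> simp [diffsOf]

theorem indC_cons (x y : Int) (r : List Int) :
    indC (x :: y :: r) = if y - x ≤ 3 then indC (y :: r) else 0 := by
  by_cases hy : y - x ≤ 3 <;> simp [indC, diffsOf, hy]

theorem sumR (mid : List Int) : ∀ (x l : Int),
    ((allMasks mid.length).map (fun mask => indC (x :: selectCh mid mask ++ [l]))).sum =
      cnt x (mid ++ [l]) := by
  induction mid with
  | nil =>
    intro x l
    simp [allMasks, selectCh, indC, diffsOf, cnt]
  | cons y mid ih =>
    intro x l
    simp only [List.length_cons]
    show ((((allMasks mid.length).map (fun l' => '0' :: l')) ++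
          ((allMasks mid.length).map (fun l' => '1' :: l'))).map
            (fun mask => indC (x :: selectCh (y :: mid) mask ++ [l]))).sum = _
    rw [List.map_append, List.sum_append, List.map_map, List.map_map]
    have e1 : ((allMasks mid.length).map
          ((fun mask => indC (x :: selectCh (y :: mid) mask ++ [l])) ∘ fun l' => '0' :: l')) =
        (allMasks mid.length).map (fun mask => indC (x :: selectCh mid mask ++ [l])) := by
      apply List.map_congr_left; intro mask _
      simp [selectCh]
    have e2 : ((allMasks mid.length).map
          ((fun mask => indC (x :: selectCh (y :: mid) mask ++ [l])) ∘ fun l' => '1' :: l')) =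
        (allMasks mid.length).map
          (fun mask => if y - x ≤ 3 then indC (y :: selectCh mid mask ++ [l]) else 0) := by
      apply List.map_congr_left; intro mask _
      simp only [Function.comp_apply, selectCh]
      exact indC_cons x y (selectCh mid mask ++ [l])
    rw [e1, e2, ih x l]
    by_cases hy : y - x ≤ 3
    · have hf : (fun mask => if y - x ≤ 3 then indC (y :: selectCh mid mask ++ [l]) else 0) =
          (fun mask => indC (y :: selectCh mid mask ++ [l])) := by simp [hy]
      rw [hf, ih y l]
      simp [cnt, hy]
      ring
    · have hf : (fun mask => if y - x ≤ 3 then indC (y :: selectCh mid mask ++ [l]) else 0) =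
          (fun _ => (0 : Int)) := by simp [hy]
      rw [hf]
      simp [cnt, hy]

theorem sel_eq (xs : List Int) (cs : List Char) (h : cs.length = xs.length) :
    ((PySem.List.pyRange 0 (xs.length : Int) 1).filter
        (fun j => (PySem.List.pyGet? cs j).getD ' ' = '1')).map
      (fun j => (PySem.List.pyGet? xs j).getD 0) = selectCh xs cs := by
  rw [PySem.List.pyRange_one, List.filter_map, List.map_map]
  have ht : ((xs.length : Int) - 0).toNat = xs.length := by omega
  rw [ht]
  have e1 : ((fun j => decide ((PySem.List.pyGet? cs j).getD ' ' = '1')) ∘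
        (fun k : Nat => (0 : Int) + ↑k)) =
      (fun k : Nat => decide ((getElem? cs k).getD ' ' = '1')) := by
    funext k
    simp [PySem.List.pyGet?_natCast]
  have e2 : ((fun j => (PySem.List.pyGet? xs j).getD 0) ∘ (fun k : Nat => (0 : Int) + ↑k)) =
      (fun k : Nat => (getElem? xs k).getD 0) := by
    funext k
    simp [PySem.List.pyGet?_natCast]
  rw [e1, e2]
  exact sel_eq_nat xs cs h

theorem diffs_eq (c : List Int) :
    (PySem.List.pyRange 0 ((c.length : Int) - 1) 1).map
      (fun k => (PySem.List.pyGet? c (k + 1)).getD 0 - (PySem.List.pyGet? c k).getD 0) =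
      diffsOf c := by
  rw [PySem.List.pyRange_one, List.map_map]
  have ht : ((c.length : Int) - 1 - 0).toNat = c.length - 1 := by omega
  rw [ht]
  have e : ((fun k => (PySem.List.pyGet? c (k + 1)).getD 0 - (PySem.List.pyGet? c k).getD 0) ∘
        (fun k : Nat => (0 : Int) + ↑k)) =
      (fun k : Nat => (getElem? c (k + 1)).getD 0 - (getElem? c k).getD 0) := by
    funext k
    have h1 : (↑k : Int) + 1 = ((k + 1 : Nat) : Int) := by push_cast; ring
    simp only [Function.comp_apply, zero_add]
    rw [h1, PySem.List.pyGet?_natCast, PySem.List.pyGet?_natCast]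
  rw [e, diffs_eq_nat]

theorem A_eq (x l : Int) (mid : List Int) (hm : mid ≠ []) :
    count_sub_arrangements (x :: mid ++ [l]) = cnt x (mid ++ [l]) := by
  have hmlen : 1 ≤ mid.length := List.length_pos_of_ne_nil hm
  have hnlen : (x :: mid ++ [l]).length = mid.length + 2 := by simp
  unfold count_sub_arrangements
  simp only []
  have hcc : (((x :: mid ++ [l]).length : Int) - 2).toNat = mid.length := by
    rw [hnlen]; omega
  rw [hcc]
  have hne1 : ¬((2 : Int) ^ mid.length = 1) := by
    have h2 : (2 : Int) ^ mid.length = ((2 ^ mid.length : Nat) : Int) := by push_cast; ring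
    have h3 : 2 ^ 1 ≤ 2 ^ mid.length := Nat.pow_le_pow_right (by norm_num) hmlen
    omega
  rw [if_neg hne1]
  have hcongr : ∀ (acc : Int), ∀ i ∈ PySem.List.pyRange 0 ((2 : Int) ^ mid.length) 1,
      pvBodyA (x :: mid ++ [l]) acc i =
      acc + indC (x :: selectCh mid (bitsM mid.length i.toNat) ++ [l]) := by
    intro acc i hi
    have hi' := (PySem.List.mem_pyRange_one).mp hi
    have hk : i.toNat < 2 ^ mid.length := by
      have h2 : (2 : Int) ^ mid.length = ((2 ^ mid.length : Nat) : Int) := by push_cast; ring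
      omega
    have hpad : List.replicate ((x :: mid ++ [l]).length - (pvFmtB i.toNat).length - 2) '0' ++
        pvFmtB i.toNat = bitsM mid.length i.toNat := by
      rw [hnlen, show mid.length + 2 - (pvFmtB i.toNat).length - 2 =
            mid.length - (pvFmtB i.toNat).length from by omega]
      exact fmt_pad mid.length i.toNat hmlen hk
    unfold pvBodyA
    simp only []
    rw [hpad]
    have hlcs : (('1' :: bitsM mid.length i.toNat) ++ ['1']).length = (x :: mid ++ [l]).length := by
      simp [bitsM_length]
    rw [sel_eq (x :: mid ++ [l]) (('1' :: bitsM mid.length i.toNat) ++ ['1']) hlcs]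
    have hsel : selectCh (x :: mid ++ [l]) (('1' :: bitsM mid.length i.toNat) ++ ['1']) =
        x :: (selectCh mid (bitsM mid.length i.toNat) ++ [l]) := by
      show (if '1' = '1' then x :: selectCh (mid ++ [l]) (bitsM mid.length i.toNat ++ ['1'])
            else selectCh (mid ++ [l]) (bitsM mid.length i.toNat ++ ['1'])) = _
      rw [if_pos rfl, selectCh_append mid (bitsM mid.length i.toNat) l (bitsM_length _ _)]
    rw [hsel, diffs_eq,
        max_ind (diffsOf (x :: (selectCh mid (bitsM mid.length i.toNat) ++ [l])))
          (diffsOf_ne x l (selectCh mid (bitsM mid.length i.toNat)))]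
    rfl

  rw [PySem.List.foldl_congr_mem _ (pvBodyA (x :: mid ++ [l]))
      (fun acc i => acc + indC (x :: selectCh mid (bitsM mid.length i.toNat) ++ [l])) 0 hcongr]
  rw [PySem.List.foldl_add]
  rw [PySem.List.pyRange_one, List.map_map]
  have ht : ((2 : Int) ^ mid.length - 0).toNat = 2 ^ mid.length := by
    rw [sub_zero, show (2 : Int) ^ mid.length = ((2 ^ mid.length : Nat) : Int) from by
      push_cast; ring]
    exact Int.toNat_natCast _
  rw [ht]
  have e : (List.range (2 ^ mid.length)).map
        ((fun i => indC (x :: selectCh mid (bitsM mid.length i.toNat) ++ [l])) ∘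
          (fun k : Nat => (0 : Int) + ↑k)) =
      (List.range (2 ^ mid.length)).map
        (fun k => indC (x :: selectCh mid (bitsM mid.length k) ++ [l])) := by
    apply List.map_congr_left
    intro k _
    simp
  rw [e, sum_bits_eq mid.length (fun mask => indC (x :: selectCh mid mask ++ [l])), sumR mid x l]
  omega

theorem A_two (a b : Int) : count_sub_arrangements [a, b] = 1 := by
  unfold count_sub_arrangements
  norm_num

-- ===== VERDICT (by name: the statement is the Claim_ definition above) =====

theorem count_sub_arrangements_spec : Claim_unchanged_count_sub_arrangements := by
  unfold Claim_unchanged_count_sub_arrangements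
  intro sublist _ pre
  unfold Pre_count_sub_arrangements at pre
  unfold Spec_count_sub_arrangements
  intro hnd
  unfold D_count_sub_arrangements at hnd
  cases sublist with
  | nil => simp at pre
  | cons a rest =>
    cases rest with
    | nil => simp at pre
    | cons b rest2 =>
      cases rest2 with
      | nil =>
        have hb : b - a ≤ 3 := by
          by_contra hc
          apply hnd
          refine ⟨rfl, ?_⟩
          show 3 < ([a, b].getD 1 0) - ([a, b].getD 0 0)
          simp only [List.getD_cons_succ, List.getD_cons_zero]
          omega
        rw [A_two a b, altB a [b] (by simp)]
        simp [cnt, hb]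
      | cons c rest3 =>
        have hlast := List.dropLast_append_getLast (l := b :: c :: rest3) (by simp)
        have hmid : (b :: c :: rest3 : List Int).dropLast ≠ [] := by
          simp [List.dropLast]
        calc count_sub_arrangements (a :: b :: c :: rest3)
            = count_sub_arrangements (a :: ((b :: c :: rest3).dropLast ++
                [(b :: c :: rest3).getLast (by simp)])) := by rw [hlast]
          _ = cnt a ((b :: c :: rest3).dropLast ++ [(b :: c :: rest3).getLast (by simp)]) :=
                A_eq _ _ _ hmid
          _ = count_sub_arrangements_alt (a :: ((b :: c :: rest3).dropLast ++
                [(b :: c :: rest3).getLast (by simp)])) := (altB _ _ (by simp)).symm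
          _ = count_sub_arrangements_alt (a :: b :: c :: rest3) := by rw [hlast]

theorem count_sub_arrangements_changed : Claim_changed_count_sub_arrangements := by
  unfold Claim_changed_count_sub_arrangements; decide

theorem count_sub_arrangements_tight : Claim_exact_count_sub_arrangements := by
  unfold Claim_exact_count_sub_arrangements
  intro sublist _ pre d
  obtain ⟨hlen, hgt⟩ := d
  cases sublist with
  | nil => simp at hlen
  | cons a rest =>
    cases rest with
    | nil => simp at hlen
    | cons b rest2 =>
      cases rest2 with
      | cons c rest3 => simp at hlen
      | nil =>
        rw [A_two a b, altB a [b] (by simp)]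
        have hgt' : ¬(b - a ≤ 3) := by simp [List.getD] at hgt; omega
        simp [cnt, hgt']
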